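-- pv_equiv track=rewrite | github.com/goldangeee/cote | programmers/lv0/beginner/직사각형넓이구하기.py | solution
-- ===== SOURCE A (Python) =====
-- def solution(dots):
--     x_arr = []
--     y_arr = []
--     for x,y in dots:
--         x_arr.append(x)
--         y_arr.append(y)
--     answer = (max(x_arr)-min(x_arr))*(max(y_arr)-min(y_arr))
--     return answer
-- ===== SOURCE B (Python) =====
-- def solution(dots):
--     x, y = dots[0]
--     min_x = max_x = x
--     min_y = max_y = y
--     for x, y in dots[1:]:
--         if x < min_x: min_x = x
--         if x > max_x: max_x = x
--         if y < min_y: min_y = y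
--         if y > max_y: max_y = y
--     return (max_x - min_x) * (max_y - min_y)
-- ===== Notes on version B (the rewrite author's own statement) =====
-- stated objective: alternative
-- what changed: Replaces building two coordinate lists and running four separate max/min reductions with a single pass that maintains four running accumulators seeded from the first dot.
-- outside the precondition, e.g. on solution([]): A raises ValueError, B raises IndexError
import Mathlib
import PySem

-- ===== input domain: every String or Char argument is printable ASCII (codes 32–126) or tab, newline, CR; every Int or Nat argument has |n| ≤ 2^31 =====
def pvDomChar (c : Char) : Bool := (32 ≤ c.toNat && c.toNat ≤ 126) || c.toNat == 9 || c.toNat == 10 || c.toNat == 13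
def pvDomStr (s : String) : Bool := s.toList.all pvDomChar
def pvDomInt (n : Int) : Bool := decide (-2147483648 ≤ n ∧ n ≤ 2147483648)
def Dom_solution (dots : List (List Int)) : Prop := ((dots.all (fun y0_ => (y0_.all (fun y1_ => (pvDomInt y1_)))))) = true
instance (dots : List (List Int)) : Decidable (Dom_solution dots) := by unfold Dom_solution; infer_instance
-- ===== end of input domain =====

-- B differs only in decomposition (one pass with running accumulators); equal wherever A returns.

-- ===== PORT A =====
-- A: build x_arr and y_arr by appending in one loop, then (max-min)*(max-min) with four reductions.
def solution (dots : List (List Int)) : Int :=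
  let arrs := dots.foldl
    (fun (acc : List Int × List Int) p =>
      (acc.1 ++ [p.headD 0], acc.2 ++ [p.getD 1 0]))
    ([], [])
  (((PySem.List.max? arrs.1 (fun v => v)).getD 0 - (PySem.List.min? arrs.1 (fun v => v)).getD 0) *
   ((PySem.List.max? arrs.2 (fun v => v)).getD 0 - (PySem.List.min? arrs.2 (fun v => v)).getD 0))

-- ===== PORT B =====
def altLoop (rest : List (List Int)) (mnx mxx mny mxy : Int) : Int :=
  match rest with
  | [] => (mxx - mnx) * (mxy - mny)
  | p :: t =>
    let x := p.headD 0
    let y := p.getD 1 0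
    altLoop t (if x < mnx then x else mnx) (if x > mxx then x else mxx)
              (if y < mny then y else mny) (if y > mxy then y else mxy)

def solution_alt (dots : List (List Int)) : Int :=
  match dots with
  | [] => 0  -- unreachable under Pre_solution (the Python B raises IndexError here, as A raises ValueError)
  | p :: rest => altLoop rest (p.headD 0) (p.headD 0) (p.getD 1 0) (p.getD 1 0)

-- ===== PRECONDITION & SPEC =====
-- Pre_ excludes the inputs on which A raises: the empty list (max([]) is ValueError) and
-- dots whose elements are not length-2 lists (the 'for x,y in dots' unpacking raises ValueError).
def Pre_solution (dots : List (List Int)) : Prop :=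
  dots ≠ [] ∧ ∀ p ∈ dots, p.length = 2
instance (dots : List (List Int)) : Decidable (Pre_solution dots) := by unfold Pre_solution; infer_instance

def pvWitness_solution : List (List Int) := [[1, 2], [3, 5]]

def Spec_solution (dots : List (List Int)) (out : Int) : Prop := out = solution_alt dots
instance (dots : List (List Int)) (out : Int) : Decidable (Spec_solution dots out) := by unfold Spec_solution; infer_instance

-- ===== CLAIM (what is proved, stated in full; the proofs are below) =====
def Claim_equal_solution : Prop := ∀ (dots : List (List Int)), Dom_solution dots → Pre_solution dots → Spec_solution dots (solution dots)

-- ===== LEMMAS AND PROOFS =====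

-- A's single append-loop builds exactly the two mapped lists.
theorem foldl_build (dots : List (List Int)) (ax ay : List Int) :
    dots.foldl
      (fun (acc : List Int × List Int) p =>
        (acc.1 ++ [p.headD 0], acc.2 ++ [p.getD 1 0]))
      (ax, ay)
    = (ax ++ dots.map (fun p => p.headD 0), ay ++ dots.map (fun p => p.getD 1 0)) := by
  induction dots generalizing ax ay with
  | nil => simp
  | cons p t ih => rw [List.foldl_cons, ih]; simp

-- B's loop computes the four running extrema of the mapped tails.
theorem altLoop_eq (rest : List (List Int)) (mnx mxx mny mxy : Int) :
    altLoop rest mnx mxx mny mxy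
    = ((rest.map (fun p => p.headD 0)).foldl max mxx - (rest.map (fun p => p.headD 0)).foldl min mnx) *
      ((rest.map (fun p => p.getD 1 0)).foldl max mxy - (rest.map (fun p => p.getD 1 0)).foldl min mny) := by
  induction rest generalizing mnx mxx mny mxy with
  | nil => simp [altLoop]
  | cons p t ih =>
    simp only [altLoop, List.map_cons, List.foldl_cons, ih]
    congr 2 <;> congr 1 <;> simp [max_def, min_def] <;> split_ifs <;> omega

-- ===== VERDICT (by name: the statement is the Claim_ definition above) =====
theorem solution_spec : Claim_equal_solution := by
  intro dots _ hpre
  obtain ⟨hne, _⟩ := hpre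
  unfold Spec_solution solution solution_alt
  match dots, hne with
  | p :: t, _ =>
    simp only [foldl_build, List.nil_append, List.map_cons,
      PySem.List.max?_id_cons, PySem.List.min?_id_cons, Option.getD_some, altLoop_eq]
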